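-- pv_equiv track=rewrite | github.com/IamJasonBian/leetcode-sync | solutions/2499-minimum-money-required-before-transactions/solution.py | minimumMoney
-- ===== SOURCE A (Python) =====
-- from typing import List
--
-- def minimumMoney(A: List[List[int]]) -> int:
--     spend = 0
--     cashback = 0
--     cost = 0
--     for i, j in A:
--         if i > j:
--             spend += i - j
--             cashback = max(cashback, j)
--         else:
--             cost = max(cost, i)
--     return spend + max(cashback, cost)
-- ===== SOURCE B (Python) =====
-- from typing import List
--
-- def minimumMoney(A: List[List[int]]) -> int:
--     # Binary search for the least starting money that can fund every transaction.
--     total = sum(max(0, i - j) for i, j in A)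
--
--     def feasible(m: int) -> bool:
--         # with m to start we must survive paying all other losses before each transaction
--         if m < total:
--             return False
--         for i, j in A:
--             if m < total - max(0, i - j) + i:
--                 return False
--         return True
--
--     lo, hi = 0, total + sum(max(0, i) for i, j in A)
--     while lo < hi:
--         mid = (lo + hi) // 2
--         if feasible(mid):
--             hi = mid
--         else:
--             lo = mid + 1
--     return lo
-- ===== Notes on version B (the rewrite author's own statement) =====
-- stated objective: alternative
-- what changed: B binary-searches for the least feasible starting amount using a per-transaction feasibility check, instead of A's single pass maintaining spend plus running cashback/cost maxima.
import Mathlib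
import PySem

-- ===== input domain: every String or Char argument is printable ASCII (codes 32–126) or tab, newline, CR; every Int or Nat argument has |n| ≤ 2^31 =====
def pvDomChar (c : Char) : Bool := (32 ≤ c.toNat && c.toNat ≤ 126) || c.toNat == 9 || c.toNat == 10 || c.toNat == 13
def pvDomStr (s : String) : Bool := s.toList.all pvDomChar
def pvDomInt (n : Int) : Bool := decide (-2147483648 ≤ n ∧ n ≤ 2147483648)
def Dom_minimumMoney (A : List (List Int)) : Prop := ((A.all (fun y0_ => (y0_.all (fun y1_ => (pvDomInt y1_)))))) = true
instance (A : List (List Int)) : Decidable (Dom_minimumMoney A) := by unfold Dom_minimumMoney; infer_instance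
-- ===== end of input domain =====

-- B replaces A's single accumulating pass by a binary search on the answer with a
-- per-transaction feasibility check (objective: alternative; not faster).

-- ===== PORT A =====
-- step of A's loop over state (spend, cashback, cost); rows of length ≠ 2 are outside Pre_
def goA (s : Int × Int × Int) (r : List Int) : Int × Int × Int :=
  match r with
  | [i, j] => if i > j then (s.1 + (i - j), max s.2.1 j, s.2.2)
              else (s.1, s.2.1, max s.2.2 i)
  | _ => s

def minimumMoney (A : List (List Int)) : Int :=
  let s := A.foldl goA (0, 0, 0)
  s.1 + max s.2.1 s.2.2

-- ===== PORT B =====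
-- max(0, i - j) of a row (rows of length ≠ 2 are outside Pre_)
def lossOf (r : List Int) : Int :=
  match r with
  | [i, j] => max 0 (i - j)
  | _ => 0

-- max(0, i) of a row
def gainOf (r : List Int) : Int :=
  match r with
  | [i, _] => max 0 i
  | _ => 0

-- the early-return loop of Source B's feasible(m)
def checkRows (total m : Int) : List (List Int) → Bool
  | [] => true
  | r :: tl =>
    match r with
    | [i, j] => if m < total - max 0 (i - j) + i then false else checkRows total m tl
    | _ => checkRows total m tl

def feasibleB (total : Int) (A : List (List Int)) (m : Int) : Bool :=
  if m < total then false else checkRows total m A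

-- the while-loop of Source B, recursion on the shrinking interval
def bsearchB (total : Int) (A : List (List Int)) (lo hi : Int) : Int :=
  if h : lo < hi then
    let mid := PySem.Int.floordiv (lo + hi) 2
    if feasibleB total A mid then bsearchB total A lo mid
    else bsearchB total A (mid + 1) hi
  else lo
termination_by (hi - lo).toNat
decreasing_by
  · have h1 : PySem.Int.floordiv (lo + hi) 2 < hi :=
      (PySem.Int.floordiv_lt_iff_lt_mul (by omega)).mpr (by omega)
    have h2 : lo ≤ PySem.Int.floordiv (lo + hi) 2 :=
      (PySem.Int.le_floordiv_iff_mul_le (by omega)).mpr (by omega)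
    omega
  · have h2 : lo ≤ PySem.Int.floordiv (lo + hi) 2 :=
      (PySem.Int.le_floordiv_iff_mul_le (by omega)).mpr (by omega)
    omega

def minimumMoney_alt (A : List (List Int)) : Int :=
  let total := A.foldl (fun acc r => acc + lossOf r) 0
  let hi := total + A.foldl (fun acc r => acc + gainOf r) 0
  bsearchB total A 0 hi

-- ===== PRECONDITION & SPEC =====
-- Python's 'for i, j in A' unpacking raises ValueError on any row of length ≠ 2,
-- so Pre_ admits exactly the inputs on which A returns.
def Pre_minimumMoney (A : List (List Int)) : Prop := ∀ r ∈ A, r.length = 2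
instance (A : List (List Int)) : Decidable (Pre_minimumMoney A) := by unfold Pre_minimumMoney; infer_instance

def pvWitness_minimumMoney : List (List Int) := [[3, 1], [2, 5]]

def Spec_minimumMoney (A : List (List Int)) (out : Int) : Prop := out = minimumMoney_alt A
instance (A : List (List Int)) (out : Int) : Decidable (Spec_minimumMoney A out) := by unfold Spec_minimumMoney; infer_instance

-- ===== CLAIM (what is proved, stated in full; the proofs are below) =====
def Claim_equal_minimumMoney : Prop := ∀ (A : List (List Int)), Dom_minimumMoney A → Pre_minimumMoney A → Spec_minimumMoney A (minimumMoney A)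

-- ===== LEMMAS AND PROOFS =====

-- value a row contributes to the final max (j on loss rows, i otherwise)
def vA (r : List Int) : Int :=
  match r with
  | [i, j] => if i > j then j else i
  | _ => 0

def totalL (A : List (List Int)) : Int := A.foldl (fun acc r => acc + lossOf r) 0
def totalG (A : List (List Int)) : Int := A.foldl (fun acc r => acc + gainOf r) 0
def maxV (b : Int) (A : List (List Int)) : Int := A.foldl (fun m r => max m (vA r)) b

lemma foldl_loss (A : List (List Int)) : ∀ b : Int,
    A.foldl (fun acc r => acc + lossOf r) b = b + totalL A := by
  induction A with
  | nil => intro b; simp [totalL]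
  | cons r tl ih =>
      intro b
      simp only [List.foldl_cons, totalL] at *
      rw [ih, ih (0 + lossOf r)]; ring

lemma totalL_cons (r : List Int) (tl : List (List Int)) :
    totalL (r :: tl) = lossOf r + totalL tl := by
  show List.foldl _ (0 + lossOf r) tl = _
  rw [foldl_loss]; ring_nf

lemma foldl_gain (A : List (List Int)) : ∀ b : Int,
    A.foldl (fun acc r => acc + gainOf r) b = b + totalG A := by
  induction A with
  | nil => intro b; simp [totalG]
  | cons r tl ih =>
      intro b
      simp only [List.foldl_cons, totalG] at *
      rw [ih, ih (0 + gainOf r)]; ring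

lemma totalG_cons (r : List Int) (tl : List (List Int)) :
    totalG (r :: tl) = gainOf r + totalG tl := by
  show List.foldl _ (0 + gainOf r) tl = _
  rw [foldl_gain]; ring_nf

lemma lossOf_nonneg (r : List Int) : 0 ≤ lossOf r := by
  unfold lossOf; split <;> simp

lemma gainOf_nonneg (r : List Int) : 0 ≤ gainOf r := by
  unfold gainOf; split <;> simp

lemma totalL_nonneg (A : List (List Int)) : 0 ≤ totalL A := by
  induction A with
  | nil => simp [totalL]
  | cons r tl ih => rw [totalL_cons]; have := lossOf_nonneg r; omega

lemma totalG_nonneg (A : List (List Int)) : 0 ≤ totalG A := by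
  induction A with
  | nil => simp [totalG]
  | cons r tl ih => rw [totalG_cons]; have := gainOf_nonneg r; omega

lemma gain_le_totalG (A : List (List Int)) (r : List Int) (h : r ∈ A) :
    gainOf r ≤ totalG A := by
  induction A with
  | nil => cases h
  | cons x tl ih =>
      rw [totalG_cons]
      rcases List.mem_cons.mp h with h | h
      · subst h; have := totalG_nonneg tl; omega
      · have := ih h; have := gainOf_nonneg x; omega

lemma spendA (A : List (List Int)) (h : Pre_minimumMoney A) : ∀ s c k : Int,
    (A.foldl goA (s, c, k)).1 = s + totalL A := by
  induction A with
  | nil => intro s c k; simp [totalL]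
  | cons r tl ih =>
      intro s c k
      have hr : r.length = 2 := h r (List.mem_cons_self ..)
      have htl : Pre_minimumMoney tl := fun x hx => h x (List.mem_cons_of_mem _ hx)
      match r, hr with
      | [i, j], _ =>
        rw [totalL_cons, List.foldl_cons]
        simp only [goA]
        split_ifs with hij <;> rw [ih htl] <;> simp only [lossOf] <;> omega

lemma maxA (A : List (List Int)) (h : Pre_minimumMoney A) : ∀ s c k : Int,
    max (A.foldl goA (s, c, k)).2.1 (A.foldl goA (s, c, k)).2.2 = maxV (max c k) A := by
  induction A with
  | nil => intro s c k; simp [maxV]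
  | cons r tl ih =>
      intro s c k
      have hr : r.length = 2 := h r (List.mem_cons_self ..)
      have htl : Pre_minimumMoney tl := fun x hx => h x (List.mem_cons_of_mem _ hx)
      match r, hr with
      | [i, j], _ =>
        rw [show maxV (max c k) ([i, j] :: tl) = maxV (max (max c k) (vA [i, j])) tl from rfl,
            List.foldl_cons]
        simp only [goA]
        split_ifs with hij <;> rw [ih htl] <;> congr 1 <;> simp only [vA] <;>
          split_ifs <;> omega

lemma maxV_le_iff (A : List (List Int)) : ∀ (b x : Int),
    maxV b A ≤ x ↔ b ≤ x ∧ ∀ r ∈ A, vA r ≤ x := by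
  induction A with
  | nil => intro b x; simp [maxV]
  | cons r tl ih =>
      intro b x
      rw [show maxV b (r :: tl) = maxV (max b (vA r)) tl from rfl, ih]
      constructor
      · rintro ⟨h1, h2⟩
        exact ⟨by omega, fun s hs => by
          rcases List.mem_cons.mp hs with h | h
          · subst h; omega
          · exact h2 s h⟩
      · rintro ⟨h1, h2⟩
        exact ⟨by have := h2 r (List.mem_cons_self ..); omega,
               fun s hs => h2 s (List.mem_cons_of_mem _ hs)⟩

lemma checkRows_iff (T m : Int) (A : List (List Int)) (h : Pre_minimumMoney A) :
    checkRows T m A = true ↔ ∀ r ∈ A, T + vA r ≤ m := by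
  induction A with
  | nil => simp [checkRows]
  | cons r tl ih =>
      have hr : r.length = 2 := h r (List.mem_cons_self ..)
      have htl : Pre_minimumMoney tl := fun x hx => h x (List.mem_cons_of_mem _ hx)
      match r, hr with
      | [i, j], _ =>
        simp only [checkRows]
        split_ifs with hlt
        · simp only [Bool.false_eq_true, false_iff]
          intro hall
          have := hall [i, j] (List.mem_cons_self ..)
          simp only [vA] at this; split_ifs at this <;> omega
        · rw [ih htl]
          constructor
          · intro hall s hs
            rcases List.mem_cons.mp hs with h | h
            · subst h; simp only [vA]; split_ifs <;> omega
            · exact hall s h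
          · intro hall s hs; exact hall s (List.mem_cons_of_mem _ hs)

lemma feasible_iff (A : List (List Int)) (h : Pre_minimumMoney A) (m : Int) :
    feasibleB (totalL A) A m = true ↔ totalL A + maxV 0 A ≤ m := by
  unfold feasibleB
  split_ifs with hlt
  · simp only [Bool.false_eq_true, false_iff]
    have : 0 ≤ maxV 0 A := by
      by_contra hc
      have := (maxV_le_iff A 0 (maxV 0 A)).mp le_rfl
      omega
    omega
  · rw [checkRows_iff _ _ _ h]
    have hmv := maxV_le_iff A 0 (m - totalL A)
    constructor
    · intro hall
      have : maxV 0 A ≤ m - totalL A := hmv.mpr ⟨by omega, fun r hr => by have := hall r hr; omega⟩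
      omega
    · intro hle r hr
      have := (hmv.mp (by omega)).2 r hr
      omega

lemma bsearch_eq (T : Int) (A : List (List Int)) (a : Int)
    (hP : ∀ m, feasibleB T A m = true ↔ a ≤ m) :
    ∀ n : Nat, ∀ lo hi : Int, (hi - lo).toNat ≤ n → lo ≤ a → a ≤ hi →
      bsearchB T A lo hi = a := by
  intro n
  induction n with
  | zero =>
      intro lo hi hn h1 h2
      rw [bsearchB]
      have : ¬ lo < hi := by omega
      simp only [this, dite_false]
      omega
  | succ n ih =>
      intro lo hi hn h1 h2
      rw [bsearchB]
      split_ifs with hlt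
      · have hmid1 : PySem.Int.floordiv (lo + hi) 2 < hi :=
          (PySem.Int.floordiv_lt_iff_lt_mul (by omega)).mpr (by omega)
        have hmid2 : lo ≤ PySem.Int.floordiv (lo + hi) 2 :=
          (PySem.Int.le_floordiv_iff_mul_le (by omega)).mpr (by omega)
        by_cases hf : feasibleB T A (PySem.Int.floordiv (lo + hi) 2) = true
        · simp only [hf, if_true]
          exact ih lo _ (by omega) h1 ((hP _).mp hf)
        · simp only [hf, if_false]
          have : ¬ a ≤ PySem.Int.floordiv (lo + hi) 2 := fun hc => hf ((hP _).mpr hc)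
          exact ih _ hi (by omega) (by omega) h2
      · omega

lemma minimumMoney_eq (A : List (List Int)) (h : Pre_minimumMoney A) :
    minimumMoney A = totalL A + maxV 0 A := by
  show (A.foldl goA (0, 0, 0)).1 + max (A.foldl goA (0, 0, 0)).2.1 (A.foldl goA (0, 0, 0)).2.2 = _
  rw [spendA A h, maxA A h]
  norm_num

-- ===== VERDICT (by name: the statement is the Claim_ definition above) =====
theorem minimumMoney_spec : Claim_equal_minimumMoney := by
  intro A _ hPre
  unfold Spec_minimumMoney minimumMoney_alt
  simp only
  rw [show A.foldl (fun acc r => acc + lossOf r) 0 = totalL A from totalL.eq_1 A ▸ rfl,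
      show A.foldl (fun acc r => acc + gainOf r) 0 = totalG A from rfl]
  have hub : totalL A + maxV 0 A ≤ totalL A + totalG A := by
    have : maxV 0 A ≤ totalG A := (maxV_le_iff A 0 (totalG A)).mpr
      ⟨totalG_nonneg A, fun r hr => by
        have hg := gain_le_totalG A r hr
        have hr2 := hPre r hr
        match r, hr2 with
        | [i, j], _ =>
          simp only [vA]; simp only [gainOf] at hg
          split_ifs <;> omega⟩
    omega
  have hlb : 0 ≤ totalL A + maxV 0 A := by
    have h0 : 0 ≤ maxV 0 A := by
      by_contra hc
      have := (maxV_le_iff A 0 (maxV 0 A)).mp le_rfl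
      omega
    have := totalL_nonneg A
    omega
  rw [minimumMoney_eq A hPre]
  exact (bsearch_eq (totalL A) A _ (feasible_iff A hPre)
    (totalL A + totalG A - 0).toNat 0 (totalL A + totalG A) le_rfl hlb hub).symm
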